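-- pv_equiv track=rewrite | github.com/Wataru-Oshima-Tokyo/nav2_kit | process_checker/process_checker/process_handler.py | checkSomeNodes
-- ===== SOURCE A (Python) =====
-- def checkSomeNodes(nodes):
--     map_server = False
--     dlio = False
--     emcl2 = False
--     for node_name, namespace in nodes:
--         if 'emcl2' in node_name:
--             emcl2=True
--         if 'dlio_map_node' in node_name:  # Adjust this check as per the exact name of your node
--             dlio=True
--         if 'map_server' in node_name:  # Adjust this check as per the exact name of your node
--             map_server=True
--     if emcl2 and dlio and map_server:
--         return True
--     return False
-- ===== SOURCE B (Python) =====
-- def checkSomeNodes(nodes):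
--     has_emcl2 = any('emcl2' in node_name for node_name, namespace in nodes)
--     has_dlio = any('dlio_map_node' in node_name for node_name, namespace in nodes)
--     has_map_server = any('map_server' in node_name for node_name, namespace in nodes)
--     return has_emcl2 and has_dlio and has_map_server
-- ===== Notes on version B (the rewrite author's own statement) =====
-- stated objective: idiomatic
-- what changed: Replaces the single flag-accumulating loop with three independent any(...) membership scans, one per target substring, joined by 'and'.
import Mathlib
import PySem

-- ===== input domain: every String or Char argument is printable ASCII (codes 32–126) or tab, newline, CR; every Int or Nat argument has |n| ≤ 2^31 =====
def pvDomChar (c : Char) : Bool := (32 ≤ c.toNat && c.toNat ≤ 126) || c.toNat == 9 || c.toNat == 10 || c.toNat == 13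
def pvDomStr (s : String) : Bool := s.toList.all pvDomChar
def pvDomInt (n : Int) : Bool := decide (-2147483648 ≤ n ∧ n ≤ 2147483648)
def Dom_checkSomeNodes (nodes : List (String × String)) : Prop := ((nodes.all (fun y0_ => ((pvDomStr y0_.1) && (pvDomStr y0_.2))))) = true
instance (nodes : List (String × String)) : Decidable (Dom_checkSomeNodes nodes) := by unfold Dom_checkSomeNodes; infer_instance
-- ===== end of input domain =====

-- ===== PORT A =====
-- B replaces A's single flag-accumulating loop with three separate any-scans, one per substring (idiomatic; same cost).
def checkSomeNodes (nodes : List (String × String)) : Bool :=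
  let st := nodes.foldl
    (fun (st : Bool × Bool × Bool) nn =>
      let e := if PySem.Str.isIn "emcl2" nn.1 then true else st.1
      let d := if PySem.Str.isIn "dlio_map_node" nn.1 then true else st.2.1
      let m := if PySem.Str.isIn "map_server" nn.1 then true else st.2.2
      (e, d, m))
    (false, false, false)
  if st.1 && st.2.1 && st.2.2 then true else false

-- ===== PORT B =====
def checkSomeNodes_alt (nodes : List (String × String)) : Bool :=
  let hasEmcl2 := nodes.any (fun nn => PySem.Str.isIn "emcl2" nn.1)
  let hasDlio := nodes.any (fun nn => PySem.Str.isIn "dlio_map_node" nn.1)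
  let hasMapServer := nodes.any (fun nn => PySem.Str.isIn "map_server" nn.1)
  hasEmcl2 && hasDlio && hasMapServer

-- ===== PRECONDITION & SPEC =====
def Spec_checkSomeNodes (nodes : List (String × String)) (out : Bool) : Prop := out = checkSomeNodes_alt nodes
instance (nodes : List (String × String)) (out : Bool) : Decidable (Spec_checkSomeNodes nodes out) := by unfold Spec_checkSomeNodes; infer_instance

-- ===== CLAIM (what is proved, stated in full; the proofs are below) =====
def Claim_equal_checkSomeNodes : Prop := ∀ (nodes : List (String × String)), Dom_checkSomeNodes nodes → Spec_checkSomeNodes nodes (checkSomeNodes nodes)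

-- ===== LEMMAS AND PROOFS =====

-- ===== VERDICT (by name: the statement is the Claim_ definition above) =====
theorem pv_if_bool (b : Bool) : (if b = true then true else false) = b := by
  cases b <;> simp

theorem checkSomeNodes_foldl (nodes : List (String × String)) (e d m : Bool) :
    nodes.foldl
      (fun (st : Bool × Bool × Bool) nn =>
        let e := if PySem.Str.isIn "emcl2" nn.1 then true else st.1
        let d := if PySem.Str.isIn "dlio_map_node" nn.1 then true else st.2.1
        let m := if PySem.Str.isIn "map_server" nn.1 then true else st.2.2
        (e, d, m))
      (e, d, m)
    = (e || nodes.any (fun nn => PySem.Str.isIn "emcl2" nn.1),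
       d || nodes.any (fun nn => PySem.Str.isIn "dlio_map_node" nn.1),
       m || nodes.any (fun nn => PySem.Str.isIn "map_server" nn.1)) := by
  induction nodes generalizing e d m with
  | nil => simp
  | cons h t ih =>
    simp only [List.foldl_cons, List.any_cons, ih]
    cases hm1 : PySem.Str.isIn "emcl2" h.1 <;>
      cases hm2 : PySem.Str.isIn "dlio_map_node" h.1 <;>
      cases hm3 : PySem.Str.isIn "map_server" h.1 <;> simp

theorem checkSomeNodes_spec : Claim_equal_checkSomeNodes := by
  intro nodes _
  unfold Spec_checkSomeNodes checkSomeNodes checkSomeNodes_alt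
  simp only [checkSomeNodes_foldl, Bool.false_or, pv_if_bool]
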